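-- pv_equiv track=rewrite | github.com/ucbepic/TWIX | backup/pattern_backup.py | block_seperation
-- ===== SOURCE A (Python) =====
-- def block_seperation(rls, row_mp, predicted_keys, row_align):
--     blk = {}#store the community of all rows belonging to the same block: bid -> a list of row id
--     blk_type = {}#store the name per block: bid-> type of block
--     bid = 0
--     row_2_blk = {} #row id -> blk type
--
--     #merge consecutive kv pairs into one kv block
--
--     for id, label in rls.items():
--         if(label == 'K'):
--             blk[bid] = []
--             blk[bid].append(id)
--             blk_type[bid] = 'table'
--             row_2_blk[id] = bid
--             bid += 1
--         elif(label == 'V'):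
--             i = id - 1
--             while(i >= 0):#find the cloest aligned key row of row with index id
--                 if(rls[i] == 'K' and row_align[(i, id)] == 1):
--                     key_blk_id = row_2_blk[i]
--                     blk[key_blk_id].append(id)
--                     break
--                 i -= 1
--         elif(label == 'KV'):
--             if(id - 1 >= 0 and rls[id-1] != 'kv'):
--                 blk[bid] = []
--             blk[bid].append(id)
--             blk_type[bid] = 'kv'
--             if(id + 1 < len(rls) and rls[id+1] != 'kv'):#if next row is not kv, create a new block
--                 bid += 1
--
--
--     for bid, name in blk_type.items():
--         #if a table block only has one row, change it to be M
--         if(name == 'table'):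
--             if(len(blk[bid]) == 1):
--                 blk_type[bid] = 'metadata'
--     return blk, blk_type
-- ===== SOURCE B (Python) =====
-- def block_seperation(rls, row_mp, predicted_keys, row_align):
--     blk = {}
--     blk_type = {}
--     row_2_blk = {}
--     bid = 0
--     n = len(rls)
--     # pass 1: build the block structure from the 'K' and 'KV' rows only
--     for id, label in rls.items():
--         if label == 'K':
--             blk[bid] = [id]
--             blk_type[bid] = 'table'
--             row_2_blk[id] = bid
--             bid += 1
--         elif label == 'KV':
--             if id - 1 >= 0 and rls.get(id - 1) != 'kv':
--                 blk[bid] = []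
--             blk[bid].append(id)
--             blk_type[bid] = 'kv'
--             if id + 1 < n and rls.get(id + 1) != 'kv':
--                 bid += 1
--     # pass 2: assign each 'V' row to the nearest aligned key row below it,
--     # looking only at key rows instead of scanning every smaller index
--     key_rows = sorted(row_2_blk)
--     for id, label in rls.items():
--         if label == 'V':
--             for k in reversed([k for k in key_rows if 0 <= k < id]):
--                 if row_align.get((k, id)) == 1:
--                     blk[row_2_blk[k]].append(id)
--                     break
--     # a table block with a single row is metadata
--     for b, name in blk_type.items():
--         if name == 'table' and len(blk[b]) == 1:
--             blk_type[b] = 'metadata'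
--     return blk, blk_type
-- ===== Notes on version B (the rewrite author's own statement) =====
-- stated objective: alternative
-- what changed: The single interleaved pass is replaced by two phases: the 'K'/'KV' rows first build all blocks, block types and the key-row index plus a sorted list of key rows, and then each 'V' row is assigned by scanning only key rows below it (instead of re-testing every smaller integer index against the row-label dict).
import Mathlib
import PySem

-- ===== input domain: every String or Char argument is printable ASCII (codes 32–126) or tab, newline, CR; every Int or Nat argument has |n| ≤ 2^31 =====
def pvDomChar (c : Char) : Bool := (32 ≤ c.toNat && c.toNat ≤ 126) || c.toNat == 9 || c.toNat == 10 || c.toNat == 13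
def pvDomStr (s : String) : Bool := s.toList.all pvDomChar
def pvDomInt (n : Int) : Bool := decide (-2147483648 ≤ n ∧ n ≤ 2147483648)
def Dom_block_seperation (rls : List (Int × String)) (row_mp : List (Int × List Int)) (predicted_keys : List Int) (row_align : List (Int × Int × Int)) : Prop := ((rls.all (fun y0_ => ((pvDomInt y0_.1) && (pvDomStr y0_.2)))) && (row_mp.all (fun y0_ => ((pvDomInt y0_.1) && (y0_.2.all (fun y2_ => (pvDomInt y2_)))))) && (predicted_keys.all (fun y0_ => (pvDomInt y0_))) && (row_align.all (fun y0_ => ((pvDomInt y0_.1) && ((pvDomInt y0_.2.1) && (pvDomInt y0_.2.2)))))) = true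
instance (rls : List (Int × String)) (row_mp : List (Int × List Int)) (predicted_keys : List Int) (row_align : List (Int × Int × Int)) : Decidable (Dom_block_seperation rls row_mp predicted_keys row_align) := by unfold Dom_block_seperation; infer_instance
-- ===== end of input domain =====

-- B replaces the single interleaved pass by two phases (build blocks from 'K'/'KV' rows,
-- then assign 'V' rows scanning only key rows); equivalence is proved on Pre_, the inputs
-- where the Python A returns without raising.

-- shared lookup helpers: dict lookup on the row-label dict and on the (i,j)-keyed alignment dict
def pvGetL (rls : List (Int × String)) (i : Int) : Option String := (PySem.Dict.mk rls).get? i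
def pvAlign (ra : List (Int × Int × Int)) (i j : Int) : Option Int :=
  (ra.find? (fun a => a.1 == i && a.2.1 == j)).map (·.2.2)

structure PvSt where
  blk : PySem.Dict Int (List Int)
  bty : PySem.Dict Int String
  bid : Int
  r2b : PySem.Dict Int Int
deriving Repr, DecidableEq

-- ===== PORT A =====
-- the 'while i >= 0' scan of the V branch, i = j - 1 counting down
def pvScanA (rls : List (Int × String)) (ra : List (Int × Int × Int)) (id : Int) : Nat → Option Int
  | 0 => none
  | j+1 =>
    if (pvGetL rls (j : Int) == some "K") && (pvAlign ra (j : Int) id == some 1) then some (j : Int)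
    else pvScanA rls ra id j

def pvStepA (rls : List (Int × String)) (ra : List (Int × Int × Int)) (n : Int) (s : PvSt) (e : Int × String) : PvSt :=
  if e.2 == "K" then
    ⟨s.blk.insert s.bid [e.1], s.bty.insert s.bid "table", s.bid + 1, s.r2b.insert e.1 s.bid⟩
  else if e.2 == "V" then
    match pvScanA rls ra e.1 e.1.toNat with
    | some i =>
      match s.r2b.get? i with
      | some b => ⟨s.blk.modify b [] (· ++ [e.1]), s.bty, s.bid, s.r2b⟩
      | none => s  -- Python raises KeyError (row_2_blk[i]); outside Pre_
    | none => s
  else if e.2 == "KV" then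
    let blk1 := if decide (0 ≤ e.1 - 1) && !(pvGetL rls (e.1 - 1) == some "kv") then s.blk.insert s.bid [] else s.blk
    ⟨blk1.modify s.bid [] (· ++ [e.1]), s.bty.insert s.bid "kv",
      if decide (e.1 + 1 < n) && !(pvGetL rls (e.1 + 1) == some "kv") then s.bid + 1 else s.bid, s.r2b⟩
  else s

def block_seperation (rls : List (Int × String)) (row_mp : List (Int × List Int)) (predicted_keys : List Int) (row_align : List (Int × Int × Int)) : (List (Int × List Int)) × (List (Int × String)) :=
  let n : Int := (rls.length : Int)
  let s := rls.foldl (pvStepA rls row_align n) ⟨PySem.Dict.mk [], PySem.Dict.mk [], 0, PySem.Dict.mk []⟩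
  (s.blk.items,
   s.bty.items.map (fun p => if p.2 == "table" && ((s.blk.getD p.1 []).length == 1) then (p.1, "metadata") else p))

-- ===== PORT B =====
def pvStepB1 (rls : List (Int × String)) (n : Int) (s : PvSt) (e : Int × String) : PvSt :=
  if e.2 == "K" then
    ⟨s.blk.insert s.bid [e.1], s.bty.insert s.bid "table", s.bid + 1, s.r2b.insert e.1 s.bid⟩
  else if e.2 == "KV" then
    let blk1 := if decide (0 ≤ e.1 - 1) && !(pvGetL rls (e.1 - 1) == some "kv") then s.blk.insert s.bid [] else s.blk
    ⟨blk1.modify s.bid [] (· ++ [e.1]), s.bty.insert s.bid "kv",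
      if decide (e.1 + 1 < n) && !(pvGetL rls (e.1 + 1) == some "kv") then s.bid + 1 else s.bid, s.r2b⟩
  else s

-- 'for k in reversed([k for k in key_rows if 0 <= k < id]): if row_align.get((k,id)) == 1: … break'
def pvFindKey (ra : List (Int × Int × Int)) (ks : List Int) (id : Int) : Option Int :=
  ((ks.filter (fun k => decide (0 ≤ k) && decide (k < id))).reverse).find? (fun k => pvAlign ra k id == some 1)

def pvStepB2 (ra : List (Int × Int × Int)) (ks : List Int) (r2b : PySem.Dict Int Int) (blk : PySem.Dict Int (List Int)) (e : Int × String) : PySem.Dict Int (List Int) :=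
  if e.2 == "V" then
    match pvFindKey ra ks e.1 with
    | some k => blk.modify (r2b.getD k 0) [] (· ++ [e.1])
    | none => blk
  else blk

def block_seperation_alt (rls : List (Int × String)) (row_mp : List (Int × List Int)) (predicted_keys : List Int) (row_align : List (Int × Int × Int)) : (List (Int × List Int)) × (List (Int × String)) :=
  let n : Int := (rls.length : Int)
  let s := rls.foldl (pvStepB1 rls n) ⟨PySem.Dict.mk [], PySem.Dict.mk [], 0, PySem.Dict.mk []⟩
  let ks := PySem.List.sorted s.r2b.keys (fun k => k) false
  let blk := rls.foldl (pvStepB2 row_align ks s.r2b) s.blk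
  (blk.items,
   s.bty.items.map (fun p => if p.2 == "table" && ((blk.getD p.1 []).length == 1) then (p.1, "metadata") else p))

-- ===== PRECONDITION & SPEC =====
-- the region (lo, id) scanned by the V branch raises nothing: every index in [lo, id) is a key
-- of rls (counted via distinct keys) and every 'K' row there has a non-1 alignment entry with id
def pvRegionOK (rls : List (Int × String)) (ra : List (Int × Int × Int)) (id lo : Int) : Bool :=
  decide ((rls.countP (fun e => decide (lo ≤ e.1) && decide (e.1 < id)) : Int) = id - lo) &&
  rls.all (fun e =>
    !(decide (lo ≤ e.1) && decide (e.1 < id) && (e.2 == "K")) ||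
    ((pvAlign ra e.1 id).isSome && !(pvAlign ra e.1 id == some 1)))

def pvEntryOK (rls : List (Int × String)) (ra : List (Int × Int × Int)) (n : Int) (pfx : List (Int × String)) (e : Int × String) : Bool :=
  (!(e.2 == "V") || !decide (1 ≤ e.1) ||
    pvRegionOK rls ra e.1 0 ||
    pfx.any (fun p => p.2 == "K" && decide (0 ≤ p.1) && decide (p.1 < e.1) &&
      (pvAlign ra p.1 e.1 == some 1) && pvRegionOK rls ra e.1 (p.1 + 1))) &&
  (!(e.2 == "KV") ||
    ((!decide (1 ≤ e.1) || (pvGetL rls (e.1 - 1)).isSome) &&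
     (!decide (e.1 + 1 < n) || (pvGetL rls (e.1 + 1)).isSome) &&
     (!(decide (e.1 < 1) || (pvGetL rls (e.1 - 1) == some "kv")) ||
      (match (pfx.filter (fun p => p.2 == "K" || p.2 == "KV")).getLast? with
       | none => false
       | some q => q.2 == "KV" && !(decide (q.1 + 1 < n) && !(pvGetL rls (q.1 + 1) == some "kv"))))))

-- Pre_ = exactly the inputs on which the Python A returns normally: distinct row ids (the
-- argument is a dict) and, entry by entry, the KeyErrors of the V scan (missing row index,
-- missing row_align entry, key row not yet processed) and of the KV branch (missing id±1 row,
-- blk[bid] absent when no new block is created) do not occur.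
def Pre_block_seperation (rls : List (Int × String)) (row_mp : List (Int × List Int)) (predicted_keys : List Int) (row_align : List (Int × Int × Int)) : Prop :=
  (rls.map Prod.fst).Nodup ∧
  ∀ k : Fin rls.length, pvEntryOK rls row_align (rls.length : Int) (rls.take k) (rls.get k) = true

instance (rls : List (Int × String)) (row_mp : List (Int × List Int)) (predicted_keys : List Int) (row_align : List (Int × Int × Int)) : Decidable (Pre_block_seperation rls row_mp predicted_keys row_align) := by
  unfold Pre_block_seperation; infer_instance

def pvWitness_block_seperation : (List (Int × String)) × (List (Int × List Int)) × List Int × (List (Int × Int × Int)) :=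
  ([(0, "K"), (1, "V"), (2, "KV")], [], [], [(0, 1, 1)])

def Spec_block_seperation (rls : List (Int × String)) (row_mp : List (Int × List Int)) (predicted_keys : List Int) (row_align : List (Int × Int × Int)) (out : (List (Int × List Int)) × (List (Int × String))) : Prop := out = block_seperation_alt rls row_mp predicted_keys row_align
instance (rls : List (Int × String)) (row_mp : List (Int × List Int)) (predicted_keys : List Int) (row_align : List (Int × Int × Int)) (out : (List (Int × List Int)) × (List (Int × String))) : Decidable (Spec_block_seperation rls row_mp predicted_keys row_align out) := by unfold Spec_block_seperation; infer_instance

-- ===== CLAIM (what is proved, stated in full; the proofs are below) =====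
def Claim_equal_block_seperation : Prop := ∀ (rls : List (Int × String)) (row_mp : List (Int × List Int)) (predicted_keys : List Int) (row_align : List (Int × Int × Int)), Dom_block_seperation rls row_mp predicted_keys row_align → Pre_block_seperation rls row_mp predicted_keys row_align → Spec_block_seperation rls row_mp predicted_keys row_align (block_seperation rls row_mp predicted_keys row_align)

-- ===== LEMMAS AND PROOFS =====

-- proof-side state update: append v to block b (the effect of a successful V row)
def pvModB (b v : Int) (s : PvSt) : PvSt := { s with blk := s.blk.modify b [] (· ++ [v]) }

-- the invariant of pass 1 relative to the processed prefix
def pvInv (pfx : List (Int × String)) (s : PvSt) : Prop :=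
  (∀ i b, s.r2b.get? i = some b → b < s.bid ∧ s.blk.contains b = true) ∧
  (∀ i, (s.r2b.get? i).isSome ↔ (i, "K") ∈ pfx)

def pvPreOn (rls : List (Int × String)) (ra : List (Int × Int × Int)) (n : Int) (pfx l : List (Int × String)) : Prop :=
  ∀ p e sfx, l = p ++ e :: sfx → pvEntryOK rls ra n (pfx ++ p) e = true

-- -------- generic Dict facts --------
theorem pv_map_any_ne {ν : Type} {b k : Int} (hne : b ≠ k) (x : ν) (l : List (Int × ν)) :
    (l.map (fun p => if p.1 == b then (b, x) else p)).any (fun p => p.1 == k) = l.any (fun p => p.1 == k) := by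
  rw [List.any_map]
  apply PySem.List.any_congr_mem
  intro p _
  by_cases h : p.1 = b <;> simp [Function.comp, h]

theorem pv_insert_insert_comm {ν : Type} (d : PySem.Dict Int ν) {b k : Int}
    (hb : d.contains b = true) (hne : b ≠ k) (w v : ν) :
    (d.insert b w).insert k v = (d.insert k v).insert b w := by
  by_cases hk : d.contains k = true
  · simp only [PySem.Dict.insert, PySem.Dict.contains] at hb hk ⊢
    simp only [hb, hk, if_true]
    simp only [pv_map_any_ne hne, pv_map_any_ne (Ne.symm hne), hb, hk, if_true]
    simp only [List.map_map]
    congr 1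
    apply List.map_congr_left
    intro p _
    by_cases h1 : p.1 = b <;> by_cases h2 : p.1 = k <;>
      simp [Function.comp, h1, h2, hne, Ne.symm hne]
  · have hk' : (d.items.any fun p => p.1 == k) = false := eq_false_of_ne_true hk
    simp only [PySem.Dict.insert, PySem.Dict.contains] at hb hk' ⊢
    simp only [hb, if_true, hk', pv_map_any_ne hne, Bool.false_eq_true, if_false]
    have h2 : ((d.items ++ [(k, v)]).any fun p => p.1 == b) = true := by
      simp [List.any_append, hb]
    simp only [h2, if_true, List.map_append]
    congr 1
    simp [hne, Ne.symm hne]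

theorem pv_modify_insert_comm {ν : Type} (d : PySem.Dict Int ν) {b k : Int}
    (hb : d.contains b = true) (hne : b ≠ k) (dflt : ν) (f : ν → ν) (v : ν) :
    (d.modify b dflt f).insert k v = (d.insert k v).modify b dflt f := by
  unfold PySem.Dict.modify
  rw [PySem.Dict.getD_insert_of_ne _ _ _ hne]
  exact pv_insert_insert_comm d hb hne _ v

theorem pv_modify_modify_comm {ν : Type} (d : PySem.Dict Int ν) {b k : Int}
    (hb : d.contains b = true) (hne : b ≠ k) (d1 d2 : ν) (f g : ν → ν) :
    (d.modify b d1 f).modify k d2 g = (d.modify k d2 g).modify b d1 f := by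
  unfold PySem.Dict.modify
  rw [PySem.Dict.getD_insert_of_ne _ _ _ (Ne.symm hne), PySem.Dict.getD_insert_of_ne _ _ _ hne]
  exact pv_insert_insert_comm d hb hne _ _

-- -------- scan characterizations --------
def pvBk (rls : List (Int × String)) (ra : List (Int × Int × Int)) (id i : Int) : Prop :=
  pvGetL rls i = some "K" ∧ pvAlign ra i id = some 1

theorem pvScanA_eq_some_iff (rls : List (Int × String)) (ra : List (Int × Int × Int)) (id : Int) (m : Nat) (i : Int) :
    pvScanA rls ra id m = some i ↔
      (0 ≤ i ∧ i < (m : Int) ∧ pvBk rls ra id i ∧ ∀ i', i < i' → i' < (m : Int) → ¬ pvBk rls ra id i') := by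
  induction m with
  | zero => simp [pvScanA]; omega
  | succ j ih =>
    by_cases h : pvBk rls ra id (j : Int)
    · have hc : ((pvGetL rls (j : Int) == some "K") && (pvAlign ra (j : Int) id == some 1)) = true := by
        obtain ⟨h1, h2⟩ := h; simp [h1, h2]
      simp only [pvScanA, hc, if_true]
      constructor
      · rintro ⟨rfl⟩
        refine ⟨by positivity, by push_cast; omega, h, ?_⟩
        intro i' h1 h2; omega
      · rintro ⟨h0, hlt, hbk, hmax⟩
        by_cases hij : i = (j : Int)
        · simp [hij]
        · exfalso; exact hmax (j : Int) (by push_cast at hlt ⊢; omega) (by push_cast; omega) h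
    · have hc : ((pvGetL rls (j : Int) == some "K") && (pvAlign ra (j : Int) id == some 1)) = false := by
        rcases Bool.eq_false_or_eq_true ((pvGetL rls (j : Int) == some "K") && (pvAlign ra (j : Int) id == some 1)) with ht | hf
        · exfalso; apply h; constructor
          · exact eq_of_beq (Bool.and_eq_true_iff.mp ht).1
          · exact eq_of_beq (Bool.and_eq_true_iff.mp ht).2
        · exact hf
      simp only [pvScanA, hc, Bool.false_eq_true, if_false, ih]
      constructor
      · rintro ⟨h0, hlt, hbk, hmax⟩
        refine ⟨h0, by push_cast at hlt ⊢; omega, hbk, ?_⟩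
        intro i' h1 h2
        by_cases hj : i' = (j : Int)
        · subst hj; exact h
        · exact hmax i' h1 (by push_cast at h2 ⊢; omega)
      · rintro ⟨h0, hlt, hbk, hmax⟩
        have : i ≠ (j : Int) := by rintro rfl; exact h hbk
        refine ⟨h0, by push_cast at hlt ⊢; omega, hbk, ?_⟩
        intro i' h1 h2
        exact hmax i' h1 (by push_cast at h2 ⊢; omega)

theorem pvScanA_eq_none_iff (rls : List (Int × String)) (ra : List (Int × Int × Int)) (id : Int) (m : Nat) :
    pvScanA rls ra id m = none ↔ ∀ i, 0 ≤ i → i < (m : Int) → ¬ pvBk rls ra id i := by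
  induction m with
  | zero => simp [pvScanA]; omega
  | succ j ih =>
    by_cases h : pvBk rls ra id (j : Int)
    · have hc : ((pvGetL rls (j : Int) == some "K") && (pvAlign ra (j : Int) id == some 1)) = true := by
        obtain ⟨h1, h2⟩ := h; simp [h1, h2]
      simp only [pvScanA, hc, if_true]
      simp only [reduceCtorEq, false_iff]
      push_neg
      exact ⟨(j : Int), by positivity, by push_cast; omega, h⟩
    · have hc : ((pvGetL rls (j : Int) == some "K") && (pvAlign ra (j : Int) id == some 1)) = false := by
        rcases Bool.eq_false_or_eq_true ((pvGetL rls (j : Int) == some "K") && (pvAlign ra (j : Int) id == some 1)) with ht | hf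
        · exfalso; apply h; exact ⟨eq_of_beq (Bool.and_eq_true_iff.mp ht).1, eq_of_beq (Bool.and_eq_true_iff.mp ht).2⟩
        · exact hf
      simp only [pvScanA, hc, Bool.false_eq_true, if_false, ih]
      constructor
      · intro hall i h0 hlt
        by_cases hj : i = (j : Int)
        · subst hj; exact h
        · exact hall i h0 (by push_cast at hlt ⊢; omega)
      · intro hall i h0 hlt
        exact hall i h0 (by push_cast at hlt ⊢; omega)

theorem pv_find?_desc {l : List Int} (hp : l.Pairwise (· > ·)) (p : Int → Bool) (x : Int) :
    l.find? p = some x ↔ (x ∈ l ∧ p x = true ∧ ∀ y ∈ l, x < y → p y = false) := by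
  induction l with
  | nil => simp
  | cons a t ih =>
    rcases List.pairwise_cons.mp hp with ⟨ha, ht⟩
    by_cases hpa : p a = true
    · rw [List.find?_cons_of_pos (p := p) hpa]
      constructor
      · rintro ⟨rfl⟩
        refine ⟨List.mem_cons_self, hpa, ?_⟩
        intro y hy hxy
        rcases List.mem_cons.mp hy with rfl | hyt
        · omega
        · exfalso; have := ha y hyt; omega
      · rintro ⟨hx, hpx, hmax⟩
        rcases List.mem_cons.mp hx with rfl | hxt
        · rfl
        · exfalso
          have hax : x < a := ha x hxt
          have := hmax a List.mem_cons_self hax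
          rw [hpa] at this; exact Bool.true_eq_false.mp this
    · have hpa' : p a = false := eq_false_of_ne_true hpa
      rw [List.find?_cons_of_neg (p := p) (by simp [hpa'])]
      rw [ih ht]
      constructor
      · rintro ⟨hx, hpx, hmax⟩
        refine ⟨List.mem_cons_of_mem _ hx, hpx, ?_⟩
        intro y hy hxy
        rcases List.mem_cons.mp hy with rfl | hyt
        · exact hpa'
        · exact hmax y hyt hxy
      · rintro ⟨hx, hpx, hmax⟩
        rcases List.mem_cons.mp hx with rfl | hxt
        · exact absurd hpx hpa
        · exact ⟨hxt, hpx, fun y hy hxy => hmax y (List.mem_cons_of_mem _ hy) hxy⟩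

theorem pvFindKey_eq_some_iff (ra : List (Int × Int × Int)) (ks : List Int) (id : Int)
    (hkp : ks.Pairwise (· < ·)) (x : Int) :
    pvFindKey ra ks id = some x ↔
      (x ∈ ks ∧ 0 ≤ x ∧ x < id ∧ pvAlign ra x id = some 1 ∧
       ∀ y ∈ ks, x < y → y < id → ¬ pvAlign ra y id = some 1) := by
  unfold pvFindKey
  have hp : (ks.filter (fun k => decide (0 ≤ k) && decide (k < id))).reverse.Pairwise (· > ·) := by
    rw [List.pairwise_reverse]
    exact List.Pairwise.filter _ hkp
  rw [pv_find?_desc hp]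
  simp only [List.mem_reverse, List.mem_filter, Bool.and_eq_true, decide_eq_true_eq]
  constructor
  · rintro ⟨⟨hx, h0, hlt⟩, hpx, hmax⟩
    refine ⟨hx, h0, hlt, by simpa using hpx, ?_⟩
    intro y hy hxy hylt hal
    have := hmax y ⟨hy, by omega, hylt⟩ hxy
    simp [hal] at this
  · rintro ⟨hx, h0, hlt, hal, hmax⟩
    refine ⟨⟨hx, h0, hlt⟩, by simpa using hal, ?_⟩
    intro y ⟨hy, hy0, hylt⟩ hxy
    have := hmax y hy hxy hylt
    simpa using this

theorem pvFindKey_eq_none_iff (ra : List (Int × Int × Int)) (ks : List Int) (id : Int) :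
    pvFindKey ra ks id = none ↔ ∀ y ∈ ks, 0 ≤ y → y < id → ¬ pvAlign ra y id = some 1 := by
  unfold pvFindKey
  rw [List.find?_eq_none]
  constructor
  · intro h y hy h0 hlt hal
    have := h y (by simp [List.mem_filter, hy, h0, hlt])
    simp [hal] at this
  · intro h y hy
    rcases List.mem_filter.mp (List.mem_reverse.mp hy) with ⟨hy', hcond⟩
    simp only [Bool.and_eq_true, decide_eq_true_eq] at hcond
    have := h y hy' hcond.1 hcond.2
    simpa using this

-- membership in rls as a dict, under distinct keys
theorem pvGetL_eq_some_iff (rls : List (Int × String)) (hnd : (rls.map Prod.fst).Nodup) (i : Int) (lab : String) :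
    pvGetL rls i = some lab ↔ (i, lab) ∈ rls := by
  unfold pvGetL
  have hk : (PySem.Dict.mk rls).keys.Nodup := by
    simpa [PySem.Dict.keys] using hnd
  exact PySem.Dict.get?_eq_some_iff_mem_items _ _ _ hk

-- -------- pass-1 fold facts --------
theorem pvStepB1_modB_comm (rls : List (Int × String)) (n : Int) (s : PvSt) (e : Int × String)
    (b v : Int) (hc : s.blk.contains b = true) (hlt : b < s.bid) :
    pvStepB1 rls n (pvModB b v s) e = pvModB b v (pvStepB1 rls n s e) := by
  have hne : b ≠ s.bid := by omega
  by_cases hK : (e.2 == "K") = true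
  · simp only [pvStepB1, pvModB, hK, if_true]
    simp [pv_modify_insert_comm s.blk hc hne]
  · by_cases hKV : (e.2 == "KV") = true
    · simp only [pvStepB1, pvModB, hK, hKV, Bool.false_eq_true, if_false, if_true]
      by_cases hc2 : (decide (0 ≤ e.1 - 1) && !(pvGetL rls (e.1 - 1) == some "kv")) = true
      · simp only [hc2, if_true]
        rw [pv_modify_insert_comm s.blk hc hne]
        rw [pv_modify_modify_comm (s.blk.insert s.bid []) (by simp [PySem.Dict.contains_insert, hc]) hne]
      · simp only [hc2, Bool.false_eq_true, if_false]
        simp [pv_modify_modify_comm s.blk hc hne]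
    · simp only [pvStepB1, pvModB, hK, hKV, Bool.false_eq_true, if_false]

theorem pvStepB1_contains_bid (rls : List (Int × String)) (n : Int) (s : PvSt) (e : Int × String)
    (b : Int) (hc : s.blk.contains b = true) (hlt : b < s.bid) :
    (pvStepB1 rls n s e).blk.contains b = true ∧ b < (pvStepB1 rls n s e).bid := by
  by_cases hK : (e.2 == "K") = true
  · simp only [pvStepB1, hK, if_true]
    simp [PySem.Dict.contains_insert, hc]
    omega
  · by_cases hKV : (e.2 == "KV") = true
    · simp only [pvStepB1, hK, hKV, Bool.false_eq_true, if_false, if_true]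
      by_cases hc2 : (decide (0 ≤ e.1 - 1) && !(pvGetL rls (e.1 - 1) == some "kv")) = true
      · simp only [hc2, if_true]
        simp [PySem.Dict.contains_modify, PySem.Dict.contains_insert, hc]
        split_ifs <;> omega
      · simp only [hc2, Bool.false_eq_true, if_false]
        simp [PySem.Dict.contains_modify, hc]
        split_ifs <;> omega
    · simp only [pvStepB1, hK, hKV, Bool.false_eq_true, if_false]
      exact ⟨hc, hlt⟩

theorem pvFoldB1_modB_comm (rls : List (Int × String)) (n : Int) (l : List (Int × String)) (s : PvSt)
    (b v : Int) (hc : s.blk.contains b = true) (hlt : b < s.bid) :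
    l.foldl (pvStepB1 rls n) (pvModB b v s) = pvModB b v (l.foldl (pvStepB1 rls n) s) := by
  induction l generalizing s with
  | nil => simp
  | cons e t ih =>
    simp only [List.foldl_cons]
    rw [pvStepB1_modB_comm rls n s e b v hc hlt]
    exact ih _ (pvStepB1_contains_bid rls n s e b hc hlt).1 (pvStepB1_contains_bid rls n s e b hc hlt).2

theorem pvFoldB1_r2b_pres (rls : List (Int × String)) (n : Int) (l : List (Int × String)) (s : PvSt)
    (i : Int) (b : Int) (h : s.r2b.get? i = some b) (hf : ∀ p ∈ l, p.1 ≠ i) :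
    (l.foldl (pvStepB1 rls n) s).r2b.get? i = some b := by
  induction l generalizing s with
  | nil => simpa using h
  | cons e t ih =>
    simp only [List.foldl_cons]
    apply ih
    · have hei : e.1 ≠ i := hf e (List.mem_cons_self)
      by_cases hK : (e.2 == "K") = true
      · simp only [pvStepB1, hK, if_true]
        rw [PySem.Dict.get?_insert_of_ne _ _ (Ne.symm hei)]
        exact h
      · by_cases hKV : (e.2 == "KV") = true <;>
          simp only [pvStepB1, hK, hKV, Bool.false_eq_true, if_false, if_true] <;> exact h
    · intro p hp; exact hf p (List.mem_cons_of_mem _ hp)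

theorem pvInv_step (rls : List (Int × String)) (n : Int) (pfx : List (Int × String)) (s : PvSt)
    (e : Int × String) (h : pvInv pfx s) (hne : e.2 ≠ "V") :
    pvInv (pfx ++ [e]) (pvStepB1 rls n s e) := by
  obtain ⟨h1, h2⟩ := h
  by_cases hK : (e.2 == "K") = true
  · have heq : e = (e.1, "K") := by
      have := eq_of_beq hK; exact Prod.ext rfl this
    constructor
    · intro i b hib
      simp only [pvStepB1, hK, if_true] at hib ⊢
      rw [PySem.Dict.get?_insert] at hib
      by_cases hi : i = e.1
      · rw [if_pos hi] at hib
        have hb : s.bid = b := by injection hib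
        subst hb
        refine ⟨by omega, ?_⟩
        simp [PySem.Dict.contains_insert]
      · rw [if_neg hi] at hib
        obtain ⟨hlt, hcon⟩ := h1 i b hib
        refine ⟨by omega, ?_⟩
        simp [PySem.Dict.contains_insert, hcon]
    · intro i
      simp only [pvStepB1, hK, if_true]
      rw [PySem.Dict.get?_insert]
      by_cases hi : i = e.1
      · rw [if_pos hi]
        simp only [Option.isSome_some, true_iff]
        apply List.mem_append_right
        rw [List.mem_singleton, heq, hi]
      · rw [if_neg hi]
        rw [h2 i]
        constructor
        · intro hm; exact List.mem_append_left _ hm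
        · intro hm
          rcases List.mem_append.mp hm with hm | hm
          · exact hm
          · exfalso
            rw [List.mem_singleton, heq] at hm
            exact hi (congrArg Prod.fst hm)
  · have hmemE : ∀ i : Int, (i, "K") ∈ pfx ++ [e] ↔ (i, "K") ∈ pfx := by
      intro i
      simp only [List.mem_append, List.mem_singleton]
      constructor
      · rintro (h | h)
        · exact h
        · exfalso; apply hK; rw [← h]; rfl
      · exact Or.inl
    by_cases hKV : (e.2 == "KV") = true
    · constructor
      · intro i b hib
        simp only [pvStepB1, hK, hKV, Bool.false_eq_true, if_false, if_true] at hib ⊢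
        obtain ⟨hlt, hcon⟩ := h1 i b hib
        by_cases hc2 : (decide (0 ≤ e.1 - 1) && !(pvGetL rls (e.1 - 1) == some "kv")) = true
        · simp only [hc2, if_true]
          simp [PySem.Dict.contains_modify, PySem.Dict.contains_insert, hcon]
          split_ifs <;> omega
        · simp only [hc2, Bool.false_eq_true, if_false]
          simp [PySem.Dict.contains_modify, hcon]
          split_ifs <;> omega
      · intro i
        simp only [pvStepB1, hK, hKV, Bool.false_eq_true, if_false, if_true]
        rw [hmemE i]
        exact h2 i
    · constructor
      · intro i b hib
        simp only [pvStepB1, hK, hKV, Bool.false_eq_true, if_false] at hib ⊢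
        exact h1 i b hib
      · intro i
        simp only [pvStepB1, hK, hKV, Bool.false_eq_true, if_false]
        rw [hmemE i]
        exact h2 i

theorem pvInv_modB (pfx : List (Int × String)) (s : PvSt) (e : Int × String) (b v : Int)
    (h : pvInv pfx s) (hV : e.2 = "V") :
    pvInv (pfx ++ [e]) (pvModB b v s) := by
  obtain ⟨h1, h2⟩ := h
  constructor
  · intro i b' hib
    simp only [pvModB] at hib ⊢
    obtain ⟨hlt, hcon⟩ := h1 i b' hib
    simp [PySem.Dict.contains_modify, hcon]
    exact hlt
  · intro i
    simp only [pvModB]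
    rw [h2 i]
    simp only [List.mem_append, List.mem_singleton]
    constructor
    · exact Or.inl
    · rintro (h | h)
      · exact h
      · exfalso
        have : e.2 = "K" := by rw [← h]
        rw [hV] at this
        exact absurd this (by decide)

theorem pvStepA_eq_B1 (rls : List (Int × String)) (ra : List (Int × Int × Int)) (n : Int) (s : PvSt)
    (e : Int × String) (hne : e.2 ≠ "V") :
    pvStepA rls ra n s e = pvStepB1 rls n s e := by
  have hV : (e.2 == "V") = false := beq_eq_false_iff_ne.mpr hne
  unfold pvStepA pvStepB1
  rw [hV]
  simp


theorem pvStepB1_V (rls : List (Int × String)) (n : Int) (s : PvSt) (e : Int × String)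
    (hV : e.2 = "V") : pvStepB1 rls n s e = s := by
  have h1 : (e.2 == "K") = false := by simp [hV]
  have h2 : (e.2 == "KV") = false := by simp [hV]
  simp [pvStepB1, h1, h2]

theorem pvInv_extV (pfx : List (Int × String)) (s : PvSt) (e : Int × String)
    (hV : e.2 = "V") (h : pvInv pfx s) : pvInv (pfx ++ [e]) s := by
  obtain ⟨h1, h2⟩ := h
  refine ⟨h1, ?_⟩
  intro i
  rw [h2 i]
  simp only [List.mem_append, List.mem_singleton]
  constructor
  · exact Or.inl
  · rintro (h | h)
    · exact h
    · exfalso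
      have : e.2 = "K" := by rw [← h]
      rw [hV] at this
      exact absurd this (by decide)

theorem pvInvFoldB1 (rls : List (Int × String)) (n : Int) :
    ∀ (l pfx : List (Int × String)) (s : PvSt), pvInv pfx s →
      pvInv (pfx ++ l) (l.foldl (pvStepB1 rls n) s) := by
  intro l
  induction l with
  | nil => intro pfx s h; simpa using h
  | cons e t ih =>
    intro pfx s h
    have h' : pvInv ((pfx ++ [e]) ++ t) (t.foldl (pvStepB1 rls n) (pvStepB1 rls n s e)) := by
      apply ih
      by_cases hV : e.2 = "V"
      · rw [pvStepB1_V rls n s e hV]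
        exact pvInv_extV pfx s e hV h
      · exact pvInv_step rls n pfx s e h hV
    simpa [List.append_assoc] using h'

theorem pvNodupKeysFoldB1 (rls : List (Int × String)) (n : Int) :
    ∀ (l : List (Int × String)) (s : PvSt), s.r2b.keys.Nodup →
      (l.foldl (pvStepB1 rls n) s).r2b.keys.Nodup := by
  intro l
  induction l with
  | nil => intro s h; simpa using h
  | cons e t ih =>
    intro s h
    apply ih
    by_cases hK : (e.2 == "K") = true
    · simp only [pvStepB1, hK, if_true]
      exact PySem.Dict.nodup_keys_insert _ _ _ h
    · by_cases hKV : (e.2 == "KV") = true <;>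
        simp only [pvStepB1, hK, hKV, Bool.false_eq_true, if_false, if_true] <;> exact h

theorem pvRegion_noBk (rls : List (Int × String)) (ra : List (Int × Int × Int))
    (hnd : (rls.map Prod.fst).Nodup) (id lo : Int) (hr : pvRegionOK rls ra id lo = true) :
    ∀ i, lo ≤ i → i < id → ¬ pvBk rls ra id i := by
  rintro i h1 h2 ⟨hK, hA⟩
  have hm : (i, "K") ∈ rls := (pvGetL_eq_some_iff rls hnd i "K").mp hK
  unfold pvRegionOK at hr
  rcases Bool.and_eq_true_iff.mp hr with ⟨_, hall⟩
  rw [List.all_eq_true] at hall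
  have := hall (i, "K") hm
  simp only [h1, h2, decide_true, Bool.and_true, Bool.true_and] at this
  simp [hA] at this

theorem pv_fresh (rls pfx t : List (Int × String)) (e p : Int × String)
    (hnd : (rls.map Prod.fst).Nodup) (hsplit : rls = pfx ++ e :: t) (hp : p ∈ pfx) :
    ∀ q ∈ t, q.1 ≠ p.1 := by
  intro q hq
  rw [hsplit, List.map_append, List.nodup_append] at hnd
  intro hqp
  have h1 : p.1 ∈ pfx.map Prod.fst := List.mem_map_of_mem hp
  have h2 : p.1 ∈ (e :: t).map Prod.fst := by
    rw [← hqp]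
    exact List.mem_map_of_mem (List.mem_cons_of_mem _ hq)
  exact hnd.2.2 p.1 h1 p.1 h2 rfl


-- -------- the main two-phase decomposition --------
theorem pvMain (rls : List (Int × String)) (ra : List (Int × Int × Int))
    (hnd : (rls.map Prod.fst).Nodup) (ks : List Int)
    (hks : ∀ i, i ∈ ks ↔ (i, "K") ∈ rls) (hkp : ks.Pairwise (· < ·)) :
    ∀ (l pfx : List (Int × String)) (s : PvSt), rls = pfx ++ l → pvInv pfx s →
      pvPreOn rls ra (rls.length : Int) pfx l →
      l.foldl (pvStepA rls ra (rls.length : Int)) s =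
        { blk := l.foldl (pvStepB2 ra ks ((l.foldl (pvStepB1 rls (rls.length : Int)) s).r2b)) ((l.foldl (pvStepB1 rls (rls.length : Int)) s).blk),
          bty := (l.foldl (pvStepB1 rls (rls.length : Int)) s).bty,
          bid := (l.foldl (pvStepB1 rls (rls.length : Int)) s).bid,
          r2b := (l.foldl (pvStepB1 rls (rls.length : Int)) s).r2b } := by
  intro l
  induction l with
  | nil =>
    intro pfx s hsplit hinv hpre
    simp
  | cons e t ih =>
    intro pfx s hsplit hinv hpre
    have hsplit' : rls = (pfx ++ [e]) ++ t := by rw [hsplit]; simp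
    have hE : pvEntryOK rls ra (rls.length : Int) pfx e = true := by
      have := hpre [] e t rfl
      simpa using this
    have hpre' : pvPreOn rls ra (rls.length : Int) (pfx ++ [e]) t := by
      intro p e' sfx hsp
      have := hpre (e :: p) e' sfx (by rw [hsp]; rfl)
      simpa [List.append_assoc] using this
    by_cases hV : (e.2 == "V") = true
    · have hVp : e.2 = "V" := eq_of_beq hV
      have hKf : (e.2 == "K") = false := by simp [hVp]
      have hSb : pvStepB1 rls (rls.length : Int) s e = s := pvStepB1_V _ _ _ _ hVp
      simp only [List.foldl_cons, hSb]
      have hE1 := (Bool.and_eq_true_iff.mp hE).1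
      simp only [hVp, BEq.rfl, Bool.not_true, Bool.false_or, Bool.or_eq_true,
        Bool.not_eq_eq_eq_not, Bool.not_true, decide_eq_false_iff_not,
        List.any_eq_true] at hE1
      rcases hE1 with (hid | hreg) | ⟨p, hp, hpc⟩
      · -- e.1 ≤ 0 : the while loop does not run
        have hscan : pvScanA rls ra e.1 e.1.toNat = none := by
          rw [Int.toNat_eq_zero.mpr (by omega)]
          rfl
        have hstepA : pvStepA rls ra (rls.length : Int) s e = s := by
          simp only [pvStepA, hKf, Bool.false_eq_true, if_false, hV, if_true, hscan]
        have hfind : pvFindKey ra ks e.1 = none := by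
          apply (pvFindKey_eq_none_iff ra ks e.1).mpr
          intro y _ h0 hlt
          omega
        have hstep2 : pvStepB2 ra ks ((t.foldl (pvStepB1 rls (rls.length : Int)) s).r2b) ((t.foldl (pvStepB1 rls (rls.length : Int)) s).blk) e = (t.foldl (pvStepB1 rls (rls.length : Int)) s).blk := by
          simp only [pvStepB2, hV, if_true, hfind]
        rw [hstepA, hstep2]
        exact ih (pfx ++ [e]) s hsplit' (pvInv_extV pfx s e hVp hinv) hpre'
      · -- no aligned key row below: the scan finds nothing on both sides
        have noBk := pvRegion_noBk rls ra hnd e.1 0 hreg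
        have hscan : pvScanA rls ra e.1 e.1.toNat = none := by
          apply (pvScanA_eq_none_iff rls ra e.1 e.1.toNat).mpr
          intro i h0 hlt
          exact noBk i h0 (by omega)
        have hstepA : pvStepA rls ra (rls.length : Int) s e = s := by
          simp only [pvStepA, hKf, Bool.false_eq_true, if_false, hV, if_true, hscan]
        have hfind : pvFindKey ra ks e.1 = none := by
          apply (pvFindKey_eq_none_iff ra ks e.1).mpr
          intro y hy h0 hlt hal
          have hyK : pvGetL rls y = some "K" := (pvGetL_eq_some_iff rls hnd y "K").mpr ((hks y).mp hy)
          exact noBk y h0 hlt ⟨hyK, hal⟩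
        have hstep2 : pvStepB2 ra ks ((t.foldl (pvStepB1 rls (rls.length : Int)) s).r2b) ((t.foldl (pvStepB1 rls (rls.length : Int)) s).blk) e = (t.foldl (pvStepB1 rls (rls.length : Int)) s).blk := by
          simp only [pvStepB2, hV, if_true, hfind]
        rw [hstepA, hstep2]
        exact ih (pfx ++ [e]) s hsplit' (pvInv_extV pfx s e hVp hinv) hpre'
      · -- an aligned key row exists: both sides append e.1 to its block
        simp only [Bool.and_eq_true, beq_iff_eq, decide_eq_true_eq] at hpc
        obtain ⟨⟨⟨⟨hpK, hp0⟩, hplt⟩, hpal⟩, hpreg⟩ := hpc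
        have hpmem : p ∈ rls := by rw [hsplit]; exact List.mem_append_left _ hp
        have hpK' : p = (p.1, "K") := Prod.ext rfl hpK
        have hgetK : pvGetL rls p.1 = some "K" :=
          (pvGetL_eq_some_iff rls hnd p.1 "K").mpr (hpK' ▸ hpmem)
        have noBkAbove := pvRegion_noBk rls ra hnd e.1 (p.1 + 1) hpreg
        have hscan : pvScanA rls ra e.1 e.1.toNat = some p.1 := by
          apply (pvScanA_eq_some_iff rls ra e.1 e.1.toNat p.1).mpr
          refine ⟨hp0, by omega, ⟨hgetK, hpal⟩, ?_⟩
          intro i' h1 h2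
          exact noBkAbove i' (by omega) (by omega)
        have hpks : p.1 ∈ ks := (hks p.1).mpr (hpK' ▸ hpmem)
        have hfind : pvFindKey ra ks e.1 = some p.1 := by
          apply (pvFindKey_eq_some_iff ra ks e.1 hkp p.1).mpr
          refine ⟨hpks, hp0, hplt, hpal, ?_⟩
          intro y hy hxy hylt hal
          have hyK : pvGetL rls y = some "K" := (pvGetL_eq_some_iff rls hnd y "K").mpr ((hks y).mp hy)
          exact noBkAbove y (by omega) hylt ⟨hyK, hal⟩
        have hsome : (s.r2b.get? p.1).isSome := (hinv.2 p.1).mpr (hpK' ▸ hp)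
        obtain ⟨b, hb⟩ := Option.isSome_iff_exists.mp hsome
        obtain ⟨hblt, hbcon⟩ := hinv.1 p.1 b hb
        have hstepA : pvStepA rls ra (rls.length : Int) s e = pvModB b e.1 s := by
          simp only [pvStepA, hKf, Bool.false_eq_true, if_false, hV, if_true, hscan, hb]
          rfl
        rw [hstepA]
        rw [ih (pfx ++ [e]) (pvModB b e.1 s) hsplit' (pvInv_modB pfx s e b e.1 hinv hVp) hpre']
        have hcomm : t.foldl (pvStepB1 rls (rls.length : Int)) (pvModB b e.1 s) =
            pvModB b e.1 (t.foldl (pvStepB1 rls (rls.length : Int)) s) :=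
          pvFoldB1_modB_comm rls (rls.length : Int) t s b e.1 hbcon hblt
        rw [hcomm]
        have hpres : (t.foldl (pvStepB1 rls (rls.length : Int)) s).r2b.get? p.1 = some b :=
          pvFoldB1_r2b_pres rls (rls.length : Int) t s p.1 b hb (pv_fresh rls pfx t e p hnd hsplit hp)
        have hstep2 : pvStepB2 ra ks ((t.foldl (pvStepB1 rls (rls.length : Int)) s).r2b) ((t.foldl (pvStepB1 rls (rls.length : Int)) s).blk) e = ((t.foldl (pvStepB1 rls (rls.length : Int)) s).blk).modify b [] (· ++ [e.1]) := by
          simp only [pvStepB2, hV, if_true, hfind]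
          rw [PySem.Dict.getD_eq_get?_getD, hpres]
          rfl
        rw [hstep2]
        simp [pvModB]
    · have hVne : e.2 ≠ "V" := by
        intro hc
        rw [hc] at hV
        exact hV rfl
      have hstep := pvStepA_eq_B1 rls ra (rls.length : Int) s e hVne
      have hV2 : (e.2 == "V") = false := eq_false_of_ne_true hV
      simp only [List.foldl_cons, hstep]
      have hstep2 : pvStepB2 ra ks ((t.foldl (pvStepB1 rls (rls.length : Int)) (pvStepB1 rls (rls.length : Int) s e)).r2b) ((t.foldl (pvStepB1 rls (rls.length : Int)) (pvStepB1 rls (rls.length : Int) s e)).blk) e = (t.foldl (pvStepB1 rls (rls.length : Int)) (pvStepB1 rls (rls.length : Int) s e)).blk := by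
        simp [pvStepB2, hV2]
      rw [hstep2]
      exact ih (pfx ++ [e]) (pvStepB1 rls (rls.length : Int) s e) hsplit'
        (pvInv_step rls (rls.length : Int) pfx s e hinv hVne) hpre'

-- ===== VERDICT (by name: the statement is the Claim_ definition above) =====
theorem block_seperation_spec : Claim_equal_block_seperation := by
  intro rls row_mp predicted_keys row_align hdom hpre
  obtain ⟨hnd, hfin⟩ := hpre
  unfold Spec_block_seperation
  have hinv0 : pvInv [] ⟨PySem.Dict.mk [], PySem.Dict.mk [], 0, PySem.Dict.mk []⟩ := by
    constructor
    · intro i b h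
      simp [PySem.Dict.get?] at h
    · intro i
      simp [PySem.Dict.get?]
  have hPreOn : pvPreOn rls row_align (rls.length : Int) [] rls := by
    intro p e sfx hsp
    have hk : p.length < rls.length := by rw [hsp]; simp
    have h1 : rls.take p.length = p := by
      conv_lhs => rw [hsp]
      exact List.take_left
    have h2 : rls.get ⟨p.length, hk⟩ = e := by
      have : rls[p.length]'hk = e := by
        conv_lhs => rw [List.getElem_of_eq hsp]
        rw [List.getElem_append_right (le_refl p.length)]
        simp
      exact this
    have := hfin ⟨p.length, hk⟩
    rw [h1, h2] at this
    simpa using this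
  have hInvS : pvInv rls (rls.foldl (pvStepB1 rls (rls.length : Int)) ⟨PySem.Dict.mk [], PySem.Dict.mk [], 0, PySem.Dict.mk []⟩) := by
    have := pvInvFoldB1 rls (rls.length : Int) rls [] ⟨PySem.Dict.mk [], PySem.Dict.mk [], 0, PySem.Dict.mk []⟩ hinv0
    simpa using this
  have hnodk : (rls.foldl (pvStepB1 rls (rls.length : Int)) ⟨PySem.Dict.mk [], PySem.Dict.mk [], 0, PySem.Dict.mk []⟩).r2b.keys.Nodup := by
    apply pvNodupKeysFoldB1
    simp [PySem.Dict.keys]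
  have hksmem : ∀ i, i ∈ PySem.List.sorted (rls.foldl (pvStepB1 rls (rls.length : Int)) ⟨PySem.Dict.mk [], PySem.Dict.mk [], 0, PySem.Dict.mk []⟩).r2b.keys (fun k => k) false ↔ (i, "K") ∈ rls := by
    intro i
    rw [(PySem.List.sorted_perm _ (fun k => k) false).mem_iff]
    rw [← PySem.Dict.contains_iff_mem_keys]
    rw [PySem.Dict.contains_eq_isSome_get?]
    have h2 := hInvS.2 i
    constructor
    · intro h
      exact h2.mp (by simpa using h)
    · intro h
      simpa using h2.mpr h
  have hkp : (PySem.List.sorted (rls.foldl (pvStepB1 rls (rls.length : Int)) ⟨PySem.Dict.mk [], PySem.Dict.mk [], 0, PySem.Dict.mk []⟩).r2b.keys (fun k => k) false).Pairwise (· < ·) := by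
    have hle := PySem.List.sorted_pairwise (rls.foldl (pvStepB1 rls (rls.length : Int)) ⟨PySem.Dict.mk [], PySem.Dict.mk [], 0, PySem.Dict.mk []⟩).r2b.keys (fun k => k)
    have hndks : (PySem.List.sorted (rls.foldl (pvStepB1 rls (rls.length : Int)) ⟨PySem.Dict.mk [], PySem.Dict.mk [], 0, PySem.Dict.mk []⟩).r2b.keys (fun k => k) false).Nodup :=
      ((PySem.List.sorted_perm _ (fun k => k) false).symm).nodup hnodk
    have hcomb := List.Pairwise.and hle hndks
    exact hcomb.imp (fun h => lt_of_le_of_ne h.1 h.2)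
  have main := pvMain rls row_align hnd _ hksmem hkp rls [] ⟨PySem.Dict.mk [], PySem.Dict.mk [], 0, PySem.Dict.mk []⟩ rfl hinv0 hPreOn
  simp only [block_seperation, block_seperation_alt]
  rw [main]
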